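-- pv_equiv track=rewrite | github.com/wizardrl/matematicaDiscreta | producto3.py | accepts_product_afds
-- ===== SOURCE A (Python) =====
-- def accepts_product_afds(s: str) -> bool:
--     # Estados para detectar la subcadena "011"
--     # 0 = q0 (no coincidencia)
--     # 1 = q1 (hemos visto '0')
--     # 2 = q2 (hemos visto '01')
--     # 3 = q3 (hemos reconocido '011' -> estado aceptador)
--     estado_sub = 0
--
--     # Estado para control de paridad (último caracter leído)
--     # None = cadena vacía (aún no evaluable)
--     # 0 = último fue '0' → cadena potencialmente par
--     # 1 = último fue '1' → cadena impar
--     estado_par = None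
--
--     # Recorremos la cadena carácter por carácter
--     for ch in s:
--         # Transiciones del AFD para subcadena "011"
--         if estado_sub == 0:
--             if ch == '0': estado_sub = 1
--             else: estado_sub = 0
--         elif estado_sub == 1:
--             if ch == '0': estado_sub = 1
--             else: estado_sub = 2
--         elif estado_sub == 2:
--             if ch == '0': estado_sub = 3  # Hemos completado "011"
--             else: estado_sub = 0
--         elif estado_sub == 3:
--             # Una vez que se encontró "011", se queda aceptando.
--             estado_sub = 3
--
--         # Actualizamos el estado de paridad
--         if ch == '0':
--             estado_par = 0
--         else:
--             estado_par = 1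
--
--     # Para aceptar la cadena debemos:
--     # - Haber llegado al estado_sub = 3 (subcadena encontrada)
--     # - Haber terminado en 0 (estado_par = 0)
--     return (estado_sub == 3) and (estado_par == 0)
-- ===== SOURCE B (Python) =====
-- def accepts_product_afds(s: str) -> bool:
--     # The DFA really detects "010" (any non-'0' char acts as '1'); normalize, then use substring search.
--     t = ''.join('0' if c == '0' else '1' for c in s)
--     return '010' in t and t.endswith('0')
-- ===== Notes on version B (the rewrite author's own statement) =====
-- stated objective: simpler
-- what changed: Replaced the hand-coded four-state product DFA pass by normalizing each character to a zero/one alphabet and using the built-in substring search for the zero-one-zero pattern together with an ends-in-zero check.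
import Mathlib
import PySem

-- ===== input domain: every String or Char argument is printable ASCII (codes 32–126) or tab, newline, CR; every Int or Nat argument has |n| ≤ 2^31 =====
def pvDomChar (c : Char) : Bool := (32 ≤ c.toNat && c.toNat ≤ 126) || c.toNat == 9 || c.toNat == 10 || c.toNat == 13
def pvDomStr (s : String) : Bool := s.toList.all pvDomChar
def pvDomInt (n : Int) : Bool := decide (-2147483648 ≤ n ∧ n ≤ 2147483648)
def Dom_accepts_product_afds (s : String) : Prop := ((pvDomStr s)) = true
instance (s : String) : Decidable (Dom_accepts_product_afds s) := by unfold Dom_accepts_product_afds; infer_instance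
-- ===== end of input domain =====

-- B replaces the hand-coded product DFA by normalizing the string to a zero/one alphabet and using
-- substring search for the zero-one-zero pattern plus an ends-in-zero check (objective: simpler).

-- ===== PORT A =====
-- one loop step of A: updates (estado_sub, estado_par) from the next character
def pvStepA (acc : Int × Option Int) (ch : Char) : Int × Option Int :=
  let estado_sub := acc.1
  let estado_sub : Int :=
    if estado_sub == 0 then (if ch == '0' then 1 else 0)
    else if estado_sub == 1 then (if ch == '0' then 1 else 2)
    else if estado_sub == 2 then (if ch == '0' then 3 else 0)
    else 3
  let estado_par : Option Int := if ch == '0' then some 0 else some 1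
  (estado_sub, estado_par)

def accepts_product_afds (s : String) : Bool :=
  let st := s.toList.foldl pvStepA ((0 : Int), (none : Option Int))
  (st.1 == 3) && (st.2 == some 0)

-- ===== PORT B =====
-- Source B's normalization: '0' stays '0', everything else becomes '1'
def pvNorm (c : Char) : Char := if c == '0' then '0' else '1'

-- hand port of Python's substring test `pat in t` (exact: a match starting at each position)
def pvHasSub (pat : List Char) : List Char → Bool
  | [] => pat.isEmpty
  | c :: tl => List.isPrefixOf pat (c :: tl) || pvHasSub pat tl

def accepts_product_afds_alt (s : String) : Bool :=
  let t := s.toList.map pvNorm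
  pvHasSub ['0', '1', '0'] t && (t.getLast? == some '0')

-- ===== PRECONDITION & SPEC =====
def Spec_accepts_product_afds (s : String) (out : Bool) : Prop := out = accepts_product_afds_alt s
instance (s : String) (out : Bool) : Decidable (Spec_accepts_product_afds s out) := by unfold Spec_accepts_product_afds; infer_instance

-- ===== CLAIM (what is proved, stated in full; the proofs are below) =====
def Claim_equal_accepts_product_afds : Prop := ∀ (s : String), Dom_accepts_product_afds s → Spec_accepts_product_afds s (accepts_product_afds s)

-- ===== LEMMAS AND PROOFS =====

-- '010' cannot start at a '1'
theorem hasSub_one (xs : List Char) :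
    pvHasSub ['0', '1', '0'] ('1' :: xs) = pvHasSub ['0', '1', '0'] xs := by
  simp [pvHasSub, List.isPrefixOf]

-- the substring-state invariant: from each of A's states 0/1/2/3, the final sub-state is 3
-- iff '010' occurs in the correspondingly completed normalized string
theorem sub_invariant (l : List Char) (par : Option Int) :
    (((l.foldl pvStepA ((0 : Int), par)).1 == 3) = pvHasSub ['0', '1', '0'] (l.map pvNorm))
  ∧ (((l.foldl pvStepA ((1 : Int), par)).1 == 3) = pvHasSub ['0', '1', '0'] ('0' :: l.map pvNorm))
  ∧ (((l.foldl pvStepA ((2 : Int), par)).1 == 3) = pvHasSub ['0', '1', '0'] ('0' :: '1' :: l.map pvNorm))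
  ∧ (((l.foldl pvStepA ((3 : Int), par)).1 == 3) = true) := by
  induction l generalizing par with
  | nil => simp [pvHasSub, List.isPrefixOf]
  | cons c l ih =>
    by_cases h : c = '0'
    · subst h
      refine ⟨?_, ?_, ?_, ?_⟩ <;>
        simp [List.foldl, pvStepA, pvNorm, (ih (some 0)).2.1,
              (ih (some 0)).2.2.2, pvHasSub, List.isPrefixOf]
    · have hn : pvNorm c = '1' := by simp [pvNorm, h]
      have hb : (c == '0') = false := by simp [h]
      refine ⟨?_, ?_, ?_, ?_⟩ <;>
        simp [List.foldl, pvStepA, hb, hn, (ih (some 1)).1, (ih (some 1)).2.2.1,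
              (ih (some 1)).2.2.2, hasSub_one, pvHasSub, List.isPrefixOf]

-- the parity-state invariant: the final estado_par is determined by the last character
theorem par_invariant (l : List Char) (st : Int × Option Int) :
    (l.foldl pvStepA st).2 =
      l.getLast?.elim st.2 (fun c => some (if c == '0' then (0 : Int) else 1)) := by
  induction l generalizing st with
  | nil => rfl
  | cons c l ih =>
    cases l with
    | nil =>
      simp only [List.foldl, pvStepA, List.getLast?_singleton, Option.elim_some]
      split_ifs <;> rfl
    | cons d l' =>
      rw [List.foldl_cons, ih]
      cases hx : (d :: l').getLast? with
      | none => simp at hx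
      | some e => rw [List.getLast?_cons_cons, hx]; rfl

-- ===== VERDICT (by name: the statement is the Claim_ definition above) =====
theorem accepts_product_afds_spec : Claim_equal_accepts_product_afds := by
  intro s _
  unfold Spec_accepts_product_afds
  simp only [accepts_product_afds, accepts_product_afds_alt]
  rw [(sub_invariant s.toList none).1, par_invariant]
  cases hl : s.toList.getLast? with
  | none => simp [hl, List.getLast?_map]
  | some c =>
    by_cases h : c = '0' <;>
      simp [hl, h, List.getLast?_map, pvNorm]
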